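-- pv_equiv track=rewrite | github.com/ShashankNagariyaCoforge/edi_automation | Pace Supply/Pace Supply/edi_mapping_generator/src/record_processor.py | _normalize_field_name
-- ===== SOURCE A (Python) =====
-- def _normalize_field_name(name: str) -> str:
--     """Normalize Excel field name to match JSON key."""
--     # Example: "Header Identifier (Location Identifier)" -> "Header_Identifier_Location_Identifier"
--     if not name:
--         return ""
--     # 1. Replace " (" with "_" to separate
--     n = name.replace(" (", "_").replace("(", "_")
--     # 2. Remove ")"
--     n = n.replace(")", "")
--     # 3. Replace remaining spaces and dashes
--     n = n.replace(" ", "_").replace("-", "_")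
--     # 4. Collapse multiple underscores
--     while "__" in n:
--         n = n.replace("__", "_")
--     return n
-- ===== SOURCE B (Python) =====
-- def _normalize_field_name(name: str) -> str:
--     """Normalize Excel field name to match JSON key (single left-to-right scan)."""
--     if not name:
--         return ""
--     out = []
--     prev_underscore = False
--     for ch in name:
--         if ch == ')':
--             continue
--         if ch in ' (-_':
--             if not prev_underscore:
--                 out.append('_')
--                 prev_underscore = True
--         else:
--             out.append(ch)
--             prev_underscore = False
--     return ''.join(out)
-- ===== Notes on version B (the rewrite author's own statement) =====
-- stated objective: simpler
-- what changed: Replaced six sequential string-replace passes plus a while-loop that repeatedly rescans the string to collapse doubled underscores with a single left-to-right scan that maps separator characters to underscores, skips closing parentheses, and collapses underscore runs via a last-emitted-underscore flag.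
import Mathlib
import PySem

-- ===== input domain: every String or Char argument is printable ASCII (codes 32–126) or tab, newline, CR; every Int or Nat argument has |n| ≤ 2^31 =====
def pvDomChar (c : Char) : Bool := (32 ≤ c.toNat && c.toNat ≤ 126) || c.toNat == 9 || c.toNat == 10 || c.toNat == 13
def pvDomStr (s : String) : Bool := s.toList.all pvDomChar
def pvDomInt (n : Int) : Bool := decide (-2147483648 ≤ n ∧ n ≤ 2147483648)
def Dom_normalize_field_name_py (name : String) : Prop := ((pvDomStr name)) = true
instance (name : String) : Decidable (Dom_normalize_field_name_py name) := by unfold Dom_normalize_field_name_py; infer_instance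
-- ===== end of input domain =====

-- B replaces A's six sequential .replace passes plus the rescanning '__'-collapse while-loop
-- by a single left-to-right scan with a last-emitted-underscore flag.

-- ===== PORT A =====
-- pvRepl is a fuel-free model of PySem.Chars.replace (CPython str.replace: left-to-right,
-- non-overlapping); it and the length lemmas below are cited by the port's termination
-- proof (normA_loop, via pvLoop_dec), so they stay above the port.
def pvRepl (old new : List Char) : List Char → List Char
  | [] => []
  | c :: t =>
    if old.isPrefixOf (c :: t) ∧ old ≠ [] then
      new ++ pvRepl old new ((c :: t).drop old.length)
    else
      c :: pvRepl old new t
termination_by l => l.length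
decreasing_by
  · have h1 : old.length ≤ (c :: t).length := List.IsPrefix.length_le (List.isPrefixOf_iff_prefix.mp (by exact_mod_cast (by assumption : _ ∧ _).1))
    have h3 : 1 ≤ old.length := List.length_pos_of_ne_nil (by assumption : _ ∧ _).2
    simp at h1 ⊢
    omega
  · simp

theorem pvReplace_go_eq (old new : List Char) (hold : old ≠ []) :
    ∀ (fuel : Nat) (l acc : List Char), l.length ≤ fuel →
      PySem.Chars.replace.go old new fuel l acc = acc.reverse ++ pvRepl old new l := by
  intro fuel
  induction fuel with
  | zero =>
    intro l acc h
    have : l = [] := List.eq_nil_of_length_eq_zero (Nat.le_zero.mp h)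
    subst this
    rw [PySem.Chars.replace.go]; simp [pvRepl]
  | succ f ih =>
    intro l acc h
    cases l with
    | nil =>
      rw [PySem.Chars.replace.go]
      · simp [pvRepl]
      · omega
    | cons c t =>
      rw [PySem.Chars.replace.go]
      by_cases hp : old.isPrefixOf (c :: t)
      · have hlen : old.length ≤ (c :: t).length := (List.isPrefixOf_iff_prefix.mp hp).length_le
        have h1 : 1 ≤ old.length := List.length_pos_of_ne_nil hold
        have hd : ((c :: t).drop old.length).length = (c :: t).length - old.length := by
          simp
        simp only [hp, if_true]
        rw [ih ((c :: t).drop old.length) (new.reverse ++ acc)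
            (by rw [hd]; simp only [List.length_cons] at h hlen hd ⊢; omega)]
        rw [pvRepl]
        simp [hp, hold]
      · simp only [hp]
        rw [ih t (c :: acc) (by simp only [List.length_cons] at h; omega)]
        rw [pvRepl]
        simp [hp]

theorem pvReplace_eq (s old new : List Char) (hold : old ≠ []) :
    PySem.Chars.replace s old new = pvRepl old new s := by
  rw [PySem.Chars.replace]
  simp [List.isEmpty_iff, hold]
  rw [pvReplace_go_eq old new hold s.length s [] le_rfl]
  simp

theorem pvRepl_len_le (l : List Char) : (pvRepl ['_','_'] ['_'] l).length ≤ l.length := by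
  match l with
  | [] => simp [pvRepl]
  | c :: t =>
    rw [pvRepl]
    split
    · have hd : List.drop (['_','_'] : List Char).length (c :: t) = t.drop 1 := rfl
      rw [hd]
      have ih := pvRepl_len_le (t.drop 1)
      simp only [List.length_drop] at ih
      simp only [List.length_append, List.length_cons, List.length_nil]
      omega
    · have ih := pvRepl_len_le t
      simp only [List.length_cons]
      omega
termination_by l.length
decreasing_by all_goals simp

theorem pvRepl_len_lt (l : List Char) (h : ['_','_'] <:+: l) :
    (pvRepl ['_','_'] ['_'] l).length < l.length := by
  match l with
  | [] => simp at h
  | c :: t =>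
    rw [pvRepl]
    split
    · rename_i hp
      have hlen : (2:Nat) ≤ (c :: t).length :=
        by simpa using (List.isPrefixOf_iff_prefix.mp hp.1).length_le
      have hd : List.drop (['_','_'] : List Char).length (c :: t) = t.drop 1 := rfl
      rw [hd]
      have hle := pvRepl_len_le (t.drop 1)
      simp only [List.length_drop] at hle
      simp only [List.length_append, List.length_cons, List.length_nil] at *
      omega
    · rename_i hp
      have ht : ['_','_'] <:+: t := by
        rcases (List.infix_cons_iff).mp h with h1 | h2
        · exact absurd (List.isPrefixOf_iff_prefix.mpr h1) (by intro hh; exact hp ⟨hh, by simp⟩)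
        · exact h2
      have := pvRepl_len_lt t ht
      simp only [List.length_cons]
      omega
termination_by l.length
decreasing_by all_goals simp

theorem pvLoop_dec (n : String) (h : PySem.Str.isIn "__" n = true) :
    (PySem.Str.replace n "__" "_").toList.length < n.toList.length := by
  have hin : ("__".toList) <:+: n.toList := ((PySem.Str.isIn_iff_infix _ _).mp h)
  have he : (PySem.Str.replace n "__" "_").toList = pvRepl ['_','_'] ['_'] n.toList := by
    rw [PySem.Str.toList_replace]
    exact pvReplace_eq _ _ _ (by simp)
  rw [he]
  exact pvRepl_len_lt _ (by simpa using hin)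

-- the 'while "__" in n: n = n.replace("__", "_")' loop of A
def normA_loop (n : String) : String :=
  if PySem.Str.isIn "__" n then normA_loop (PySem.Str.replace n "__" "_") else n
termination_by n.toList.length
decreasing_by exact pvLoop_dec n (by assumption)

def normalize_field_name_py (name : String) : String :=
  if name = "" then "" else
    let n1 := PySem.Str.replace (PySem.Str.replace name " (" "_") "(" "_"
    let n2 := PySem.Str.replace n1 ")" ""
    let n3 := PySem.Str.replace (PySem.Str.replace n2 " " "_") "-" "_"
    normA_loop n3

-- ===== PORT B =====
def normalize_field_name_py_alt (name : String) : String :=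
  if name = "" then "" else
    let step := fun (st : List Char × Bool) (c : Char) =>
      if c = ')' then st
      else if c = ' ' ∨ c = '(' ∨ c = '-' ∨ c = '_' then
        (if st.2 then st else (st.1 ++ ['_'], true))
      else (st.1 ++ [c], false)
    String.ofList (name.toList.foldl step ([], false)).1

-- ===== PRECONDITION & SPEC =====
def Spec_normalize_field_name_py (name : String) (out : String) : Prop := out = normalize_field_name_py_alt name
instance (name : String) (out : String) : Decidable (Spec_normalize_field_name_py name out) := by unfold Spec_normalize_field_name_py; infer_instance

-- ===== CLAIM (what is proved, stated in full; the proofs are below) =====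
def Claim_equal_normalize_field_name_py : Prop := ∀ (name : String), Dom_normalize_field_name_py name → Spec_normalize_field_name_py name (normalize_field_name_py name)

-- ===== LEMMAS AND PROOFS =====

def pvGoC : Bool → List Char → List Char
  | _, [] => []
  | prev, c :: t =>
    if c = '_' then (if prev then pvGoC true t else '_' :: pvGoC true t)
    else c :: pvGoC false t

-- collapse is invariant under one replace("__","_") pass

theorem pvGoC_repl (l : List Char) : ∀ prev, pvGoC prev (pvRepl ['_','_'] ['_'] l) = pvGoC prev l := by
  match l with
  | [] => intro prev; simp [pvRepl]
  | c :: t =>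
    intro prev
    rw [pvRepl]
    split
    · rename_i hp
      have hpre : (['_','_'] : List Char) <+: c :: t := List.isPrefixOf_iff_prefix.mp hp.1
      obtain ⟨r, hr⟩ := hpre
      have hc : c = '_' := by simpa using (congrArg (fun x => x.head?) hr).symm
      have ht : t = '_' :: r := by simpa using (congrArg (fun x => x.tail) hr).symm
      subst hc; subst ht
      have hd : List.drop (['_','_'] : List Char).length ('_' :: '_' :: r) = r := rfl
      rw [hd]
      have ih := pvGoC_repl r
      simp [pvGoC, ih]
    · rename_i hp
      have ih := pvGoC_repl t
      by_cases hc : c = '_'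
      · subst hc; simp [pvGoC, ih]
      · simp [pvGoC, hc, ih]
termination_by l.length
decreasing_by
  · simp
  · subst ht; simp

-- a string with no "__" is a fixpoint of the collapse scan

theorem pvGoC_fix : ∀ (l : List Char), ¬ (['_','_'] <:+: l) →
    (pvGoC false l = l ∧ (l.head? ≠ some '_' → pvGoC true l = l)) := by
  intro l
  induction l with
  | nil => simp [pvGoC]
  | cons c t ih =>
    intro h
    have hnt : ¬ (['_','_'] <:+: t) := fun hh => h (List.infix_cons_iff.mpr (Or.inr hh))
    by_cases hc : c = '_'
    · subst hc
      have hth : t.head? ≠ some '_' := by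
        intro hh
        cases t with
        | nil => simp at hh
        | cons d r =>
          simp at hh
          subst hh
          exact h (List.infix_cons_iff.mpr (Or.inl ⟨r, rfl⟩))
      constructor
      · simp [pvGoC, (ih hnt).2 hth]
      · intro hh; simp at hh
    · constructor
      · simp [pvGoC, hc, (ih hnt).1]
      · intro _; simp [pvGoC, hc, (ih hnt).1]

theorem normA_loop_eq (n : String) : normA_loop n = String.ofList (pvGoC false n.toList) := by
  rw [normA_loop]
  split
  · rename_i h
    rw [normA_loop_eq (PySem.Str.replace n "__" "_")]
    refine congrArg String.ofList ?_
    rw [PySem.Str.toList_replace, pvReplace_eq _ _ _ (by simp)]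
    exact pvGoC_repl n.toList false
  · rename_i h
    have hni : ¬ (['_','_'] <:+: n.toList) := by
      intro hh
      exact h ((PySem.Str.isIn_iff_infix _ _).mpr (by simpa using hh))
    rw [(pvGoC_fix n.toList hni).1]
    exact String.ofList_toList.symm
termination_by n.toList.length
decreasing_by exact pvLoop_dec n (by assumption)

def pvF (c : Char) : Char := if c = ' ' ∨ c = '-' ∨ c = '(' then '_' else c

def pvMff (l : List Char) : List Char := (l.filter (fun c => decide (c ≠ ')'))).map pvF



theorem pvChainHead (c : Char) (h1 : c ≠ ')') :
    (if (if (if c = '(' then '_' else c) = ' ' then '_' else (if c = '(' then '_' else c)) = '-'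
        then '_' else (if (if c = '(' then '_' else c) = ' ' then '_' else (if c = '(' then '_' else c))) = pvF c := by
  by_cases hs : c = ' ' <;> by_cases hm : c = '-' <;> by_cases hp : c = '(' <;>
    simp_all [pvF]

theorem pvChain (l : List Char) :
    ((((l.map (fun c => if c = '(' then '_' else c)).filter
        (fun c => decide (c ≠ ')'))).map (fun c => if c = ' ' then '_' else c)).map
        (fun c => if c = '-' then '_' else c)) = pvMff l := by
  induction l with
  | nil => simp [pvMff]
  | cons c t ih =>
    by_cases h1 : c = ')'
    · subst h1
      simpa [pvMff] using ih
    · have h2 : (if c = '(' then '_' else c) ≠ ')' := by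
        by_cases hc : c = '(' <;> simp [hc, h1]
      simp only [pvMff, List.map_cons]
      simp only [List.filter_cons, h1, h2, ne_eq, decide_not, decide_false, Bool.not_false,
        if_true, List.map_cons, List.cons.injEq]
      exact ⟨pvChainHead c h1, by simpa [pvMff] using ih⟩

theorem pvRepl_single (a b : Char) (l : List Char) :
    pvRepl [a] [b] l = l.map (fun c => if c = a then b else c) := by
  induction l with
  | nil => simp [pvRepl]
  | cons c t ih =>
    rw [pvRepl]
    by_cases hc : c = a
    · subst hc
      rw [if_pos (by simp [List.isPrefixOf])]
      simp [ih]
    · rw [if_neg (by simp [List.isPrefixOf]; intro hh; exact absurd hh.symm hc)]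
      simp [ih, hc]

theorem pvRepl_del (a : Char) (l : List Char) :
    pvRepl [a] [] l = l.filter (fun c => decide (c ≠ a)) := by
  induction l with
  | nil => simp [pvRepl]
  | cons c t ih =>
    rw [pvRepl]
    by_cases hc : c = a
    · subst hc
      rw [if_pos (by simp [List.isPrefixOf])]
      simp [ih]
    · rw [if_neg (by simp [List.isPrefixOf]; intro hh; exact absurd hh.symm hc)]
      simp [ih, hc]

theorem pvMff_cons (c : Char) (t : List Char) :
    pvMff (c :: t) = if c = ')' then pvMff t else pvF c :: pvMff t := by
  by_cases h : c = ')' <;> simp [pvMff, List.filter_cons, h]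

theorem pvGoC_mff_repl2 (l : List Char) :
    ∀ prev, pvGoC prev (pvMff (pvRepl [' ','('] ['_'] l)) = pvGoC prev (pvMff l) := by
  match l with
  | [] => intro prev; simp [pvRepl]
  | c :: t =>
    intro prev
    rw [pvRepl]
    split
    · rename_i hp
      have hpre : ([' ','('] : List Char) <+: c :: t := List.isPrefixOf_iff_prefix.mp hp.1
      obtain ⟨r, hr⟩ := hpre
      have hc : c = ' ' := by simpa using (congrArg (fun x => x.head?) hr).symm
      have ht : t = '(' :: r := by simpa using (congrArg (fun x => x.tail) hr).symm
      subst hc; subst ht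
      have hd : List.drop ([' ','('] : List Char).length (' ' :: '(' :: r) = r := rfl
      rw [hd]
      have ih := pvGoC_mff_repl2 r
      simp [pvMff_cons, pvGoC, pvF, ih]
    · rename_i hp
      have ih := pvGoC_mff_repl2 t
      by_cases h1 : c = ')'
      · simp [pvMff_cons, h1, ih]
      · by_cases hf : pvF c = '_' <;> simp [pvMff_cons, h1, hf, pvGoC, ih]
termination_by l.length
decreasing_by
  · simp
  · subst ht; simp

def pvRecB : Bool → List Char → List Char
  | _, [] => []
  | prev, c :: t =>
    if c = ')' then pvRecB prev t
    else if c = ' ' ∨ c = '(' ∨ c = '-' ∨ c = '_' then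
      (if prev then pvRecB true t else '_' :: pvRecB true t)
    else c :: pvRecB false t

theorem pvRecB_eq (cs : List Char) : ∀ prev, pvRecB prev cs = pvGoC prev (pvMff cs) := by
  induction cs with
  | nil => simp [pvRecB, pvMff, pvGoC]
  | cons c t ih =>
    intro prev
    rw [pvRecB]
    by_cases h1 : c = ')'
    · simp [h1, pvMff_cons, ih]
    · by_cases h2 : c = ' ' ∨ c = '(' ∨ c = '-' ∨ c = '_'
      · have hf : pvF c = '_' := by
          rcases h2 with h | h | h | h <;> simp [pvF, h]
        simp [h1, h2, pvMff_cons, hf, pvGoC, ih]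
      · have hf : pvF c = c := by
          push_neg at h2
          simp [pvF, h2.1, h2.2.1, h2.2.2.1]
        have hu : c ≠ '_' := by
          push_neg at h2; exact h2.2.2.2
        simp [h1, pvMff_cons, hf, hu, pvGoC, ih]
        intro h
        exact absurd (by tauto) h2

theorem pvFoldB (cs : List Char) (acc : List Char) (prev : Bool) :
    (cs.foldl (fun (st : List Char × Bool) (c : Char) =>
      if c = ')' then st
      else if c = ' ' ∨ c = '(' ∨ c = '-' ∨ c = '_' then
        (if st.2 then st else (st.1 ++ ['_'], true))
      else (st.1 ++ [c], false)) (acc, prev)).1 = acc ++ pvRecB prev cs := by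
  induction cs generalizing acc prev with
  | nil => simp [pvRecB]
  | cons c t ih =>
    simp only [List.foldl_cons]
    rw [pvRecB]
    by_cases h1 : c = ')'
    · simp [h1, ih]
    · by_cases h2 : c = ' ' ∨ c = '(' ∨ c = '-' ∨ c = '_'
      · cases prev <;> simp [h1, h2, ih]
      · simp [h1, h2, ih]

theorem pvMain (name : String) : normalize_field_name_py name = normalize_field_name_py_alt name := by
  unfold normalize_field_name_py normalize_field_name_py_alt
  by_cases h : name = ""
  · simp [h]
  · rw [if_neg h, if_neg h]
    show normA_loop
        (PySem.Str.replace
          (PySem.Str.replace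
            (PySem.Str.replace (PySem.Str.replace (PySem.Str.replace name " (" "_") "(" "_") ")" "")
            " " "_") "-" "_") =
      String.ofList (name.toList.foldl (fun (st : List Char × Bool) (c : Char) =>
        if c = ')' then st
        else if c = ' ' ∨ c = '(' ∨ c = '-' ∨ c = '_' then
          (if st.2 then st else (st.1 ++ ['_'], true))
        else (st.1 ++ [c], false)) ([], false)).1
    rw [normA_loop_eq, pvFoldB, List.nil_append, pvRecB_eq]
    refine congrArg String.ofList ?_
    rw [PySem.Str.toList_replace, PySem.Str.toList_replace, PySem.Str.toList_replace,
        PySem.Str.toList_replace, PySem.Str.toList_replace]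
    rw [pvReplace_eq _ _ _ (by simp), pvReplace_eq _ _ _ (by simp),
        pvReplace_eq _ _ _ (by simp), pvReplace_eq _ _ _ (by simp),
        pvReplace_eq _ _ _ (by simp)]
    rw [show ("-".toList = ['-']) from rfl, show (" ".toList = [' ']) from rfl,
        show (")".toList = [')']) from rfl, show ("(".toList = ['(']) from rfl,
        show ("_".toList = ['_']) from rfl, show (" (".toList = [' ','(']) from rfl,
        show ("".toList = ([] : List Char)) from rfl]
    rw [pvRepl_single, pvRepl_single, pvRepl_del, pvRepl_single]
    rw [pvChain]
    exact pvGoC_mff_repl2 name.toList false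

-- ===== VERDICT (by name: the statement is the Claim_ definition above) =====
theorem normalize_field_name_py_spec : Claim_equal_normalize_field_name_py := by
  intro name _
  exact pvMain name
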